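-- pv_equiv track=rewrite | github.com/Edward70891/practicalProjects | week6/question3.py | generateBasePattern
-- ===== SOURCE A (Python) =====
-- def generateBasePattern(size, str1, str2):
--     if size < 3:
--         raise ValueError("Size too small!")
--     output = []
--     for i in range(size):
--         line = ""
--         for o in range(size):
--             if o == i or o == size - i - 1:
--                 line += str1
--             else:
--                 line += str2
--         output.append(line)
--     return output
-- ===== SOURCE B (Python) =====
-- def generateBasePattern(size, str1, str2):
--     if size < 3:
--         raise ValueError("Size too small!")
--
--     def row(i):
--         cells = [str2] * size
--         cells[i] = str1
--         cells[size - 1 - i] = str1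
--         return "".join(cells)
--
--     return [row(i) for i in range(size)]
-- ===== Notes on version B (the rewrite author's own statement) =====
-- stated objective: simpler
-- what changed: B replaces the per-cell inner loop with direct construction of each row: a [str2]*size list with the two X positions overwritten, then joined; A raises ValueError for size < 3 and so does B, excluded by Pre_.
import Mathlib
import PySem

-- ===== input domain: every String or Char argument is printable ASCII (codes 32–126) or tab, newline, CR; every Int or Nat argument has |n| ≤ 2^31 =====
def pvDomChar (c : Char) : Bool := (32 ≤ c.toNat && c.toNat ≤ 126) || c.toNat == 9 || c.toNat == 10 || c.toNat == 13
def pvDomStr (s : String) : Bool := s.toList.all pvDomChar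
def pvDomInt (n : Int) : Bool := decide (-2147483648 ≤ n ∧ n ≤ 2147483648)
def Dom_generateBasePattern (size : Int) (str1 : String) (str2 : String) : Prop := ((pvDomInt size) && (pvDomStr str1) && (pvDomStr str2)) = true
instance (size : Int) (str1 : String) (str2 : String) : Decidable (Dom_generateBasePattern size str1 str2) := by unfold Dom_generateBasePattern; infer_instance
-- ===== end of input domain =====

-- B builds each row directly (a [str2]*size list with the two X positions overwritten, joined)
-- instead of A's per-cell inner loop with a branch; objective: simpler. Equal return values on Pre_.

-- ===== PORT A =====
-- for size < 3 Python raises ValueError; excluded by Pre_, the port returns [] there.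
def generateBasePattern (size : Int) (str1 : String) (str2 : String) : List String :=
  if size < 3 then []
  else
    (List.range size.toNat).foldl
      (fun (output : List String) (i : ℕ) =>
        output ++ [(List.range size.toNat).foldl
          (fun (line : String) (o : ℕ) =>
            line ++ (if (o : Int) = (i : Int) ∨ (o : Int) = size - (i : Int) - 1 then str1 else str2))
          ""])
      []

-- ===== PORT B =====
-- row i = join of ([str2]*size with positions i and size-1-i set to str1); size-1-i ≥ 0 on Pre_.
def generateBasePattern_alt (size : Int) (str1 : String) (str2 : String) : List String :=
  if size < 3 then []
  else
    (List.range size.toNat).map (fun (i : ℕ) =>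
      String.join (((List.replicate size.toNat str2).set i str1).set (size.toNat - 1 - i) str1))

-- ===== PRECONDITION & SPEC =====
-- Python A raises ValueError exactly when size < 3.
def Pre_generateBasePattern (size : Int) (str1 : String) (str2 : String) : Prop := 3 ≤ size
instance (size : Int) (str1 : String) (str2 : String) : Decidable (Pre_generateBasePattern size str1 str2) := by unfold Pre_generateBasePattern; infer_instance
def pvWitness_generateBasePattern : Int × String × String := (4, "X", ".")

def Spec_generateBasePattern (size : Int) (str1 : String) (str2 : String) (out : List String) : Prop := out = generateBasePattern_alt size str1 str2
instance (size : Int) (str1 : String) (str2 : String) (out : List String) : Decidable (Spec_generateBasePattern size str1 str2 out) := by unfold Spec_generateBasePattern; infer_instance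

-- ===== CLAIM (what is proved, stated in full; the proofs are below) =====
def Claim_equal_generateBasePattern : Prop := ∀ (size : Int) (str1 : String) (str2 : String), Dom_generateBasePattern size str1 str2 → Pre_generateBasePattern size str1 str2 → Spec_generateBasePattern size str1 str2 (generateBasePattern size str1 str2)

-- ===== LEMMAS AND PROOFS =====

-- A's outer loop (append one row per i) is map over range.
theorem foldl_append_singleton_eq_map {α β : Type} (g : α → β) :
    ∀ (l : List α) (s : List β),
      l.foldl (fun out i => out ++ [g i]) s = s ++ l.map g := by
  intro l
  induction l with
  | nil => intro s; simp
  | cons a t ih => intro s; simp [List.foldl, ih]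

-- folding ++ from s equals s ++ the join.
theorem str_foldl_append :
    ∀ (l : List String) (s : String),
      l.foldl (fun r t => r ++ t) s = s ++ String.join l := by
  intro l
  induction l with
  | nil => intro s; simp [String.join]
  | cons a t ih =>
      intro s
      have h1 : String.join (a :: t) = a ++ String.join t := by
        simp only [String.join, List.foldl]
        rw [ih]
        simp [String.join]
      simp only [List.foldl]
      rw [ih, h1, String.append_assoc]

-- A's inner loop (string accumulation) is join of the mapped cells.
theorem foldl_str_append_eq_join (f : ℕ → String) (l : List ℕ) (s : String) :
    l.foldl (fun (line : String) (o : ℕ) => line ++ f o) s = s ++ String.join (l.map f) := by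
  rw [← List.foldl_map, str_foldl_append]

-- The per-cell branch equals the two-overwrite row, cell by cell.
theorem row_cells_eq (size : Int) (h3 : 3 ≤ size) (str1 str2 : String) (i : ℕ)
    (hi : i < size.toNat) :
    (List.range size.toNat).map
        (fun (o : ℕ) => if (o : Int) = (i : Int) ∨ (o : Int) = size - (i : Int) - 1 then str1 else str2)
      = ((List.replicate size.toNat str2).set i str1).set (size.toNat - 1 - i) str1 := by
  apply List.ext_getElem
  · simp
  · intro o h1 h2
    have hn : size.toNat < size.toNat + 1 := Nat.lt_succ_self _
    have ho : o < size.toNat := by simpa using h1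
    have hsz : (size.toNat : Int) = size := Int.toNat_of_nonneg (by omega)
    simp only [List.getElem_map, List.getElem_range, List.getElem_set,
      List.getElem_replicate]
    split_ifs <;> first | rfl | omega

theorem generateBasePattern_eq (size : Int) (str1 str2 : String) (h3 : 3 ≤ size) :
    generateBasePattern size str1 str2 = generateBasePattern_alt size str1 str2 := by
  unfold generateBasePattern generateBasePattern_alt
  rw [if_neg (by omega), if_neg (by omega)]
  rw [foldl_append_singleton_eq_map]
  simp only [List.nil_append]
  apply List.map_congr_left
  intro i hi
  rw [foldl_str_append_eq_join]
  rw [row_cells_eq size h3 str1 str2 i (by simpa using hi)]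
  simp

-- ===== VERDICT (by name: the statement is the Claim_ definition above) =====
theorem generateBasePattern_spec : Claim_equal_generateBasePattern := by
  intro size str1 str2 _ hpre
  unfold Spec_generateBasePattern
  exact generateBasePattern_eq size str1 str2 hpre
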